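-- pv_equiv track=rewrite | github.com/Tanboontor-Krittamet/Band-Interview | Superman's Chicken Rescue/SupermanChiken.py | rescue
-- ===== SOURCE A (Python) =====
-- def rescue(roof, chickens):
--   num_rescued = 0
--   for i in range(len(chickens)):
--     reach = chickens[i] + roof - 1
--     count = 1
--     for j in range(i + 1, len(chickens)):
--       if reach >= chickens[j]:
--         count += 1
--       else:
--         break
--     if count > num_rescued:
--       num_rescued = count
--   return num_rescued
-- ===== SOURCE B (Python) =====
-- def rescue(roof, chickens):
--     # Single left-to-right pass: keep the "alive" runs (threshold, length so far);
--     # each new chicken extends the runs it fits under, kills the others, and starts its own.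
--     alive = []  # list of (threshold, count), in start order
--     best = 0
--     for c in chickens:
--         new_alive = []
--         for t, cnt in alive:
--             if t >= c:
--                 new_alive.append((t, cnt + 1))
--             elif cnt > best:
--                 best = cnt
--         new_alive.append((c + roof - 1, 1))
--         alive = new_alive
--     for t, cnt in alive:
--         if cnt > best:
--             best = cnt
--     return best
-- ===== Notes on version B (the rewrite author's own statement) =====
-- stated objective: alternative
-- what changed: A restarts a forward scan from every start index (nested loops with break); B makes a single left-to-right pass keeping the set of still-alive runs (threshold, length), extending survivors and recording a run's length when an element kills it.
import Mathlib
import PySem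

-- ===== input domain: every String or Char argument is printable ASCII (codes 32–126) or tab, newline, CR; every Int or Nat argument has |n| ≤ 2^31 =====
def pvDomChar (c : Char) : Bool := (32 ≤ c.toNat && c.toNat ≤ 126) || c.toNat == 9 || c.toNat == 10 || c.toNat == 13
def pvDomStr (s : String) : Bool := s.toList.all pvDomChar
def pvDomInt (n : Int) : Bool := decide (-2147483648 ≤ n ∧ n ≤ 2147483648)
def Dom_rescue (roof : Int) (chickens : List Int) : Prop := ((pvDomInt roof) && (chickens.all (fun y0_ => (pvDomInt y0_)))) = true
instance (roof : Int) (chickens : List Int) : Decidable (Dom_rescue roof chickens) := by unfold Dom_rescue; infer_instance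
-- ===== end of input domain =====

-- B replaces A's restart-from-every-start nested scan by a single left-to-right pass over the
-- chickens that maintains the still-alive runs; objective: alternative (same worst-case cost).

-- ===== PORT A =====
-- inner 'for j in range(i+1, n): … else: break' loop of A, as structural recursion on j
def rescueInner (cs : List Int) (reach : Int) (j : Nat) (count : Int) : Int :=
  if h : j < cs.length then
    if reach ≥ cs[j] then rescueInner cs reach (j + 1) (count + 1) else count
  else count
termination_by cs.length - j

def rescue (roof : Int) (chickens : List Int) : Int :=
  (List.range chickens.length).foldl (fun num i =>
    let reach := chickens.getD i 0 + roof - 1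
    let count := rescueInner chickens reach (i + 1) 1
    if count > num then count else num) 0

-- ===== PORT B =====
-- body of B's inner 'for t, cnt in alive' loop: extend surviving runs, record killed ones in best
def rescueKill (c : Int) (acc : List (Int × Int) × Int) (p : Int × Int) : List (Int × Int) × Int :=
  if p.1 ≥ c then (acc.1 ++ [(p.1, p.2 + 1)], acc.2)
  else if p.2 > acc.2 then (acc.1, p.2) else (acc.1, acc.2)

-- one iteration of B's outer 'for c in chickens' loop
def rescueStep (roof : Int) (s : List (Int × Int) × Int) (c : Int) : List (Int × Int) × Int :=
  let r := s.1.foldl (rescueKill c) ([], s.2)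
  (r.1 ++ [(c + roof - 1, 1)], r.2)

def rescue_alt (roof : Int) (chickens : List Int) : Int :=
  let s := chickens.foldl (rescueStep roof) ([], 0)
  s.1.foldl (fun best p => if p.2 > best then p.2 else best) s.2

-- ===== PRECONDITION & SPEC =====
def Spec_rescue (roof : Int) (chickens : List Int) (out : Int) : Prop := out = rescue_alt roof chickens
instance (roof : Int) (chickens : List Int) (out : Int) : Decidable (Spec_rescue roof chickens out) := by unfold Spec_rescue; infer_instance

-- ===== CLAIM (what is proved, stated in full; the proofs are below) =====
def Claim_equal_rescue : Prop := ∀ (roof : Int) (chickens : List Int), Dom_rescue roof chickens → Spec_rescue roof chickens (rescue roof chickens)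

-- ===== LEMMAS AND PROOFS =====

-- take-while count: how many leading elements are ≤ t
def twc (t : Int) : List Int → Int
  | [] => 0
  | c :: r => if t ≥ c then 1 + twc t r else 0

-- reference value: best run length over all starts
def runBest (roof : Int) : List Int → Int
  | [] => 0
  | c :: r => max (1 + twc (c + roof - 1) r) (runBest roof r)

-- value of the alive set, given the remaining input rest
def aliveVal (rest : List Int) (alive : List (Int × Int)) (b : Int) : Int :=
  alive.foldl (fun best p => max best (p.2 + twc p.1 rest)) b

-- A's outer-loop body, named for the proofs (definitionally the lambda in rescue)
def rescueBody (roof : Int) (cs : List Int) (num : Int) (i : Nat) : Int :=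
  let reach := cs.getD i 0 + roof - 1
  let count := rescueInner cs reach (i + 1) 1
  if count > num then count else num

theorem runBest_nonneg (roof : Int) (l : List Int) : 0 ≤ runBest roof l := by
  induction l with
  | nil => simp [runBest]
  | cons c r ih => simp only [runBest]; exact le_max_of_le_right ih

theorem rescueInner_eq (cs : List Int) (reach : Int) (j : Nat) (count : Int) :
    rescueInner cs reach j count = count + twc reach (cs.drop j) := by
  induction hn : cs.length - j using Nat.strong_induction_on generalizing j count with
  | _ n ih =>
    rw [rescueInner]
    by_cases h : j < cs.length
    · rw [List.drop_eq_getElem_cons h]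
      simp only [h, dif_pos, twc]
      by_cases hr : reach ≥ cs[j]
      · rw [if_pos hr, if_pos hr, ih (cs.length - (j + 1)) (by omega) (j + 1) (count + 1) rfl]
        omega
      · rw [if_neg hr, if_neg hr]; omega
    · simp [h, List.drop_eq_nil_of_le (by omega : cs.length ≤ j), twc]

theorem rescueBody_eq (roof : Int) (cs : List Int) (num : Int) (i : Nat) (hi : i < cs.length) :
    rescueBody roof cs num i = max num (1 + twc (cs[i] + roof - 1) (cs.drop (i + 1))) := by
  simp only [rescueBody, List.getD_eq_getElem cs 0 hi, rescueInner_eq]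
  rw [max_def]; split_ifs <;> omega

theorem rescue_loop (roof : Int) (cs : List Int) (i : Nat) (acc : Int)
    (hi : i ≤ cs.length) (hacc : 0 ≤ acc) :
    (List.range' i (cs.length - i)).foldl (rescueBody roof cs) acc
      = max acc (runBest roof (cs.drop i)) := by
  induction hn : cs.length - i using Nat.strong_induction_on generalizing i acc with
  | _ n ih =>
    match n, hn with
    | 0, hn =>
      have : i = cs.length := by omega
      subst this
      simp [List.drop_length, runBest, max_eq_left hacc]
    | Nat.succ m, hn =>
      have hlt : i < cs.length := by omega
      rw [List.range'_succ, List.foldl_cons, rescueBody_eq roof cs acc i hlt]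
      have hm : cs.length - (i + 1) = m := by omega
      rw [← hm] at ih ⊢
      rw [ih (cs.length - (i + 1)) (by omega) (i + 1) _ (by omega) (le_max_of_le_left hacc) rfl]
      rw [List.drop_eq_getElem_cons hlt]
      simp only [runBest]
      rw [max_assoc]

theorem rescue_eq_runBest (roof : Int) (cs : List Int) :
    rescue roof cs = runBest roof cs := by
  have h := rescue_loop roof cs 0 0 (Nat.zero_le _) le_rfl
  simp only [Nat.sub_zero, List.drop_zero] at h
  have h0 : rescue roof cs = (List.range' 0 cs.length).foldl (rescueBody roof cs) 0 := by
    rw [rescue, List.range_eq_range']; rfl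
  rw [h0, h, max_eq_right (runBest_nonneg roof cs)]

-- aliveVal facts
theorem aliveVal_cons (rest : List Int) (p : Int × Int) (ps : List (Int × Int)) (b : Int) :
    aliveVal rest (p :: ps) b = aliveVal rest ps (max b (p.2 + twc p.1 rest)) := by
  simp [aliveVal]

theorem aliveVal_append_single (rest : List Int) (xs : List (Int × Int)) (b : Int) (p : Int × Int) :
    aliveVal rest (xs ++ [p]) b = max (aliveVal rest xs b) (p.2 + twc p.1 rest) := by
  simp [aliveVal, List.foldl_append]

theorem aliveVal_max_init (rest : List Int) (xs : List (Int × Int)) (b v : Int) :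
    aliveVal rest xs (max b v) = max (aliveVal rest xs b) v := by
  induction xs generalizing b with
  | nil => simp [aliveVal]
  | cons p ps ih =>
    simp only [aliveVal, List.foldl_cons] at *
    rw [max_right_comm, ih]

theorem le_aliveVal (rest : List Int) (xs : List (Int × Int)) (b : Int) :
    b ≤ aliveVal rest xs b := by
  induction xs generalizing b with
  | nil => simp [aliveVal]
  | cons p ps ih =>
    simp only [aliveVal, List.foldl_cons] at *
    exact le_trans (le_max_left _ _) (ih _)

theorem kill_snd_nonneg (c : Int) (alive acc : List (Int × Int)) (b : Int) (hb : 0 ≤ b) :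
    0 ≤ (alive.foldl (rescueKill c) (acc, b)).2 := by
  induction alive generalizing acc b with
  | nil => simpa using hb
  | cons p ps ih =>
    rw [List.foldl_cons]
    simp only [rescueKill]
    split_ifs with h1 h2
    · exact ih _ _ hb
    · exact ih _ _ (by omega)
    · exact ih _ _ hb

theorem kill_eq (c : Int) (r : List Int) (alive acc : List (Int × Int)) (b : Int) :
    aliveVal r (alive.foldl (rescueKill c) (acc, b)).1 (alive.foldl (rescueKill c) (acc, b)).2
      = aliveVal (c :: r) alive (aliveVal r acc b) := by
  induction alive generalizing acc b with
  | nil => simp [aliveVal]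
  | cons p ps ih =>
    rw [List.foldl_cons, aliveVal_cons]
    by_cases h : p.1 ≥ c
    · rw [show rescueKill c (acc, b) p = (acc ++ [(p.1, p.2 + 1)], b) from by
        simp [rescueKill, if_pos h]]
      rw [ih, aliveVal_append_single]
      congr 1
      simp only [twc]
      rw [if_pos h]
      omega
    · rw [show rescueKill c (acc, b) p = (acc, max b p.2) from by
        simp only [rescueKill, if_neg h]
        split_ifs with h2 <;> simp only [Prod.mk.injEq, true_and] <;> omega]
      rw [ih, aliveVal_max_init]
      congr 1
      simp only [twc]
      rw [if_neg h]
      omega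

theorem finish_eq (xs : List (Int × Int)) (b : Int) :
    xs.foldl (fun best p => if p.2 > best then p.2 else best) b = aliveVal [] xs b := by
  induction xs generalizing b with
  | nil => simp [aliveVal]
  | cons p ps ih =>
    rw [List.foldl_cons, aliveVal_cons, ih]
    congr 1
    simp only [twc]
    rw [max_def]; split_ifs <;> omega

theorem alt_loop (roof : Int) (rest : List Int) (alive : List (Int × Int)) (b : Int) (hb : 0 ≤ b) :
    (let s := rest.foldl (rescueStep roof) (alive, b)
     s.1.foldl (fun best p => if p.2 > best then p.2 else best) s.2)
      = max (aliveVal rest alive b) (runBest roof rest) := by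
  induction rest generalizing alive b with
  | nil =>
    simp only [List.foldl_nil, runBest]
    rw [finish_eq]
    exact (max_eq_left (le_trans hb (le_aliveVal _ _ _))).symm
  | cons c r ih =>
    simp only [List.foldl_cons]
    have hstep : rescueStep roof (alive, b) c
        = ((alive.foldl (rescueKill c) ([], b)).1 ++ [(c + roof - 1, 1)],
           (alive.foldl (rescueKill c) ([], b)).2) := rfl
    rw [hstep, ih _ _ (kill_snd_nonneg c alive [] b hb)]
    rw [aliveVal_append_single, kill_eq]
    simp only [aliveVal, List.foldl_nil, runBest]
    rw [max_assoc]

theorem alt_eq_runBest (roof : Int) (cs : List Int) :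
    rescue_alt roof cs = runBest roof cs := by
  have h := alt_loop roof cs [] 0 le_rfl
  simp only [aliveVal, List.foldl_nil] at h
  rw [rescue_alt, h, max_eq_right (runBest_nonneg roof cs)]

-- ===== VERDICT (by name: the statement is the Claim_ definition above) =====
theorem rescue_spec : Claim_equal_rescue := by
  intro roof chickens _
  unfold Spec_rescue
  rw [rescue_eq_runBest, alt_eq_runBest]
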